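-- pv_equiv track=rewrite | github.com/iwalton3/cl-pprint | format_jsonl.py | find_user_for_plan
-- ===== SOURCE A (Python) =====
-- def find_user_for_plan(plan_idx, user_positions, plan_positions):
--     """Find the user message index that contains a given plan."""
--     if plan_idx not in plan_positions:
--         return None
--     plan_line = plan_positions[plan_idx]
--     # Find the user message just before this plan
--     for line_num, user_idx in reversed(user_positions):
--         if line_num < plan_line:
--             return user_idx
--     return None
-- ===== SOURCE B (Python) =====
-- def find_user_for_plan(plan_idx, user_positions, plan_positions):
--     """Find the user message index that contains a given plan."""
--     if plan_idx not in plan_positions: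
--         return None
--     plan_line = plan_positions[plan_idx]
--     result = None
--     for line_num, user_idx in user_positions:
--         if line_num < plan_line:
--             result = user_idx
--     return result
-- ===== Notes on version B (the rewrite author's own statement) =====
-- stated objective: idiomatic
-- what changed: B scans user_positions forward with an overwriting accumulator (last match) instead of A's early-return scan over reversed(user_positions) (first match backward); no reversal is performed.
import Mathlib
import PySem

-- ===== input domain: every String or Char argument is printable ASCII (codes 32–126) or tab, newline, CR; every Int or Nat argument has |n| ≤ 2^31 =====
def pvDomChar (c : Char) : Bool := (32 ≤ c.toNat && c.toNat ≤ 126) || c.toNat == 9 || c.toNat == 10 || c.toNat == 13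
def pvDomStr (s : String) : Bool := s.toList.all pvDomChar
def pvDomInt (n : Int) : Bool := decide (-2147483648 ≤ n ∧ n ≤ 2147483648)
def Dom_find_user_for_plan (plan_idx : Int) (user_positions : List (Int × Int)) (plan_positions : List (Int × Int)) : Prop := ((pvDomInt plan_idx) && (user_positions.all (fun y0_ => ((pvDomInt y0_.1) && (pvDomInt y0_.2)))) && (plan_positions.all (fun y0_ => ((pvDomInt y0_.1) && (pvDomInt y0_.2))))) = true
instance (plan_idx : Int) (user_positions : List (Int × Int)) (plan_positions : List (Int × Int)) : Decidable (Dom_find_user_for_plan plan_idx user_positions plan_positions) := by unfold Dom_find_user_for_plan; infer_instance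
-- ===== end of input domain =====

-- B replaces A's early-return scan over reversed(user_positions) by a forward scan with an overwriting accumulator (last match); same O(n) cost, no reversal.


-- ===== PORT A =====
-- reversed(user_positions) early-return scan: first (line_num, user_idx) with line_num < plan_line
def pvScanRevA (pl : Int) : List (Int × Int) → Option Int
  | [] => none
  | (line_num, user_idx) :: rest =>
      if line_num < pl then some user_idx else pvScanRevA pl rest

def find_user_for_plan (plan_idx : Int) (user_positions : List (Int × Int)) (plan_positions : List (Int × Int)) : Option Int :=
  match (PySem.Dict.mk plan_positions).get? plan_idx with
  | none => none
  | some plan_line => pvScanRevA plan_line user_positions.reverse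

-- ===== PORT B =====
def find_user_for_plan_alt (plan_idx : Int) (user_positions : List (Int × Int)) (plan_positions : List (Int × Int)) : Option Int :=
  match (PySem.Dict.mk plan_positions).get? plan_idx with
  | none => none
  | some plan_line =>
      user_positions.foldl (fun result p => if p.1 < plan_line then some p.2 else result) none

-- ===== PRECONDITION & SPEC =====
def Spec_find_user_for_plan (plan_idx : Int) (user_positions : List (Int × Int)) (plan_positions : List (Int × Int)) (out : Option Int) : Prop := out = find_user_for_plan_alt plan_idx user_positions plan_positions
instance (plan_idx : Int) (user_positions : List (Int × Int)) (plan_positions : List (Int × Int)) (out : Option Int) : Decidable (Spec_find_user_for_plan plan_idx user_positions plan_positions out) := by unfold Spec_find_user_for_plan; infer_instance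

-- ===== CLAIM (what is proved, stated in full; the proofs are below) =====
def Claim_equal_find_user_for_plan : Prop := ∀ (plan_idx : Int) (user_positions : List (Int × Int)) (plan_positions : List (Int × Int)), Dom_find_user_for_plan plan_idx user_positions plan_positions → Spec_find_user_for_plan plan_idx user_positions plan_positions (find_user_for_plan plan_idx user_positions plan_positions)

-- ===== LEMMAS AND PROOFS =====

-- ===== VERDICT (by name: the statement is the Claim_ definition above) =====
theorem pvRev_eq_foldl (pl : Int) (l : List (Int × Int)) :
    pvScanRevA pl l.reverse = l.foldl (fun result p => if p.1 < pl then some p.2 else result) none := by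
  induction l using List.reverseRecOn with
  | nil => rfl
  | append_singleton l x ih =>
      rcases x with ⟨a, b⟩
      by_cases h : a < pl <;>
        simp [List.foldl_append, List.reverse_append, pvScanRevA, h, ih]

theorem find_user_for_plan_spec : Claim_equal_find_user_for_plan := by
  intro plan_idx user_positions plan_positions _
  unfold Spec_find_user_for_plan find_user_for_plan find_user_for_plan_alt
  cases (PySem.Dict.mk plan_positions).get? plan_idx with
  | none => rfl
  | some pl => exact pvRev_eq_foldl pl user_positions
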